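-- pv_equiv track=rewrite | github.com/Arsen1302/Code-copy-detector | TestData/solutions/problem_1335_5.py | solution_1335_5
-- ===== SOURCE A (Python) =====
-- def solution_1335_5(s: str) -> str:
--     stack = []
--     count = 0
--
--     while count < len(s):
--         if stack == []:
--             stack.append(s[count])
--             count += 1
--             continue
--         elif len(stack) >= 2:
--             if s[count] == stack[-1] and s[count] == stack[-2]:
--                 stack.pop(-1)
--         stack.append(s[count])
--         count += 1
--
--     return ''.join(stack)
-- ===== SOURCE B (Python) =====
-- def solution_1335_5(s: str) -> str:
--     # group-then-emit: split s into maximal runs, cap each run at 2 characters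
--     out = []
--     i = 0
--     n = len(s)
--     while i < n:
--         j = i
--         while j < n and s[j] == s[i]:
--             j += 1
--         out.append(s[i] * min(j - i, 2))
--         i = j
--     return ''.join(out)
-- ===== Notes on version B (the rewrite author's own statement) =====
-- stated objective: alternative
-- what changed: Replaces the per-character stack scan (push every char, pop when the top two equal it) with a run-based pass: find each maximal run of equal characters and emit it capped at two, joining the pieces.
import Mathlib
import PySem

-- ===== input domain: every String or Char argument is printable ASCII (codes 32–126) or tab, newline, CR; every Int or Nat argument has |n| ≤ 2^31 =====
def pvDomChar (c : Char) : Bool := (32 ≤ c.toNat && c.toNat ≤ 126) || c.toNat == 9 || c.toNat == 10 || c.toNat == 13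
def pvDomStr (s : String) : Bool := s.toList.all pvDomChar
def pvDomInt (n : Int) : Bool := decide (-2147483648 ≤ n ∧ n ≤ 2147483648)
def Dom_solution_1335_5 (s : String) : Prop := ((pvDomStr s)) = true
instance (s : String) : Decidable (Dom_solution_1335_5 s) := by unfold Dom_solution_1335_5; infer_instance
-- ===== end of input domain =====

-- B replaces A's per-character stack scan with a run-based pass (emit each maximal run capped at 2); alternative decomposition, same cost.

-- ===== PORT A =====
-- Python's stack (append/pop at the end, peek stack[-1]/stack[-2]) is represented
-- with the TOP at the head of the list; ''.join(stack) is therefore the reverse.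
def pvALoop : List Char → List Char → List Char
  | [], st => st
  | c :: rest, st =>
    match st with
    | [] => pvALoop rest [c]                             -- stack == []: append, continue
    | [a] => pvALoop rest (c :: [a])                     -- len(stack) < 2: just append
    | a :: b :: t =>                                     -- len(stack) >= 2
      if c = a ∧ c = b then pvALoop rest (c :: b :: t)   -- pop then append
      else pvALoop rest (c :: a :: b :: t)               -- append

def solution_1335_5 (s : String) : String :=
  String.ofList (pvALoop s.toList []).reverse

-- ===== PORT B =====
-- inner while: measure the leading run of c, return (extra length, rest)
def pvTakeRun (c : Char) : List Char → Nat × List Char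
  | [] => (0, [])
  | x :: xs => if x = c then let (n, r) := pvTakeRun c xs; (n + 1, r) else (0, x :: xs)

theorem pvTakeRun_le (c : Char) : ∀ (xs : List Char), (pvTakeRun c xs).2.length ≤ xs.length := by
  intro xs
  induction xs with
  | nil => simp [pvTakeRun]
  | cons x xs ih =>
    simp only [pvTakeRun]
    split
    · simpa using Nat.le_succ_of_le (by simpa using ih)
    · simp

-- outer while: one maximal run per step, emit min (len, 2) copies
def pvBLoop : List Char → List Char
  | [] => []
  | c :: xs =>
    let p := pvTakeRun c xs
    List.replicate (min (p.1 + 1) 2) c ++ pvBLoop p.2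
termination_by l => l.length
decreasing_by
  simpa using Nat.lt_succ_of_le (pvTakeRun_le c xs)

def solution_1335_5_alt (s : String) : String :=
  String.ofList (pvBLoop s.toList)

-- ===== PRECONDITION & SPEC =====
def Spec_solution_1335_5 (s : String) (out : String) : Prop := out = solution_1335_5_alt s
instance (s : String) (out : String) : Decidable (Spec_solution_1335_5 s out) := by unfold Spec_solution_1335_5; infer_instance

-- ===== CLAIM (what is proved, stated in full; the proofs are below) =====
def Claim_equal_solution_1335_5 : Prop := ∀ (s : String), Dom_solution_1335_5 s → Spec_solution_1335_5 s (solution_1335_5 s)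

-- ===== LEMMAS AND PROOFS =====

-- the common "emit capped at two" continuation: flag = true means the last
-- emitted character a already occurs twice in a row (further a's are dropped)
def pvM : List Char → Char → Bool → List Char
  | [], _, _ => []
  | c :: r, a, true => if c = a then pvM r a true else c :: pvM r c false
  | c :: r, a, false => if c = a then c :: pvM r a true else c :: pvM r c false

-- the stack below the top two entries is inert
theorem pvALoop_tail : ∀ (l : List Char) (a b : Char) (t : List Char),
    pvALoop l (a :: b :: t) = pvALoop l [a, b] ++ t := by
  intro l
  induction l with
  | nil => intro a b t; simp [pvALoop]
  | cons c rest ih =>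
    intro a b t
    simp only [pvALoop]
    split
    · rw [ih, ih]
    · rw [ih c a (b :: t), ih c a [b], List.append_assoc]; rfl

theorem pvALoop_pair : ∀ (l : List Char) (a b : Char),
    (pvALoop l [a, b]).reverse = b :: a :: pvM l a (decide (a = b)) := by
  intro l
  induction l with
  | nil => intro a b; simp [pvALoop, pvM]
  | cons c rest ih =>
    intro a b
    by_cases hab : a = b
    · subst hab
      by_cases hc : c = a
      · subst hc
        simp only [pvALoop, and_self, if_true]
        rw [ih]
        simp [pvM]
      · have hcc : ¬(c = a ∧ c = a) := fun h => hc h.1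
        simp only [pvALoop, if_neg hcc]
        rw [pvALoop_tail rest c a [a], List.reverse_append, ih]
        simp [pvM, hc]
    · have hcc : ¬(c = a ∧ c = b) := fun h => hab (h.1 ▸ h.2)
      simp only [pvALoop, if_neg hcc]
      rw [pvALoop_tail rest c a [b], List.reverse_append, ih]
      by_cases hc : c = a
      · subst hc
        simp [pvM, hab]
      · simp [pvM, hc, hab]

theorem pvALoop_single (l : List Char) (c : Char) :
    (pvALoop l [c]).reverse = c :: pvM l c false := by
  cases l with
  | nil => simp [pvALoop, pvM]
  | cons d rest =>
    simp only [pvALoop, pvM]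
    rw [pvALoop_pair]
    by_cases hd : d = c
    · simp [hd]
    · simp [hd]

-- B's run-based loop computes the same continuation (strong induction on length,
-- proving both flag cases at once)
theorem pvBLoop_M : ∀ (n : Nat) (xs : List Char) (c : Char), xs.length ≤ n →
    pvBLoop (c :: xs) = c :: pvM xs c false ∧ pvM xs c true = pvBLoop (pvTakeRun c xs).2 := by
  intro n
  induction n with
  | zero =>
    intro xs c h
    have hx : xs = [] := List.eq_nil_of_length_eq_zero (Nat.le_zero.mp h)
    subst hx
    simp [pvBLoop, pvM, pvTakeRun]
  | succ n ih =>
    intro xs c h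
    cases xs with
    | nil => simp [pvBLoop, pvM, pvTakeRun]
    | cons d ys =>
      have hy : ys.length ≤ n := Nat.lt_succ_iff.mp (by simpa using h)
      by_cases hd : d = c
      · subst hd
        constructor
        · have h2 := (ih ys d hy).2
          simp only [pvBLoop, pvTakeRun, if_true]
          rw [← h2]
          have h3 : min ((pvTakeRun d ys).1 + 1 + 1) 2 = 2 := by omega
          rw [h3]
          simp [pvM, List.replicate]
        · simp only [pvM, pvTakeRun, if_true]
          exact (ih ys d hy).2
      · constructor
        · have h1 := (ih ys d hy).1
          conv_lhs => rw [pvBLoop]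
          simp only [pvTakeRun, if_neg hd]
          rw [h1]
          simp [pvM, hd]
        · simp only [pvM, pvTakeRun, if_neg hd]
          exact ((ih ys d hy).1).symm

-- ===== VERDICT (by name: the statement is the Claim_ definition above) =====
theorem solution_1335_5_spec : Claim_equal_solution_1335_5 := by
  intro s _
  unfold Spec_solution_1335_5 solution_1335_5 solution_1335_5_alt
  congr 1
  cases hs : s.toList with
  | nil => simp [pvALoop, pvBLoop]
  | cons c xs =>
    simp only [pvALoop]
    rw [pvALoop_single, ((pvBLoop_M xs.length xs c le_rfl).1)]
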